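-- pv_equiv track=rewrite | github.com/isiangani1/keylogger | core/reporting.py | _analyze_password_strength
-- ===== SOURCE A (Python) =====
-- from typing import Dict, List, Optional, Any
--
-- def _analyze_password_strength(credentials: List[Dict]) -> Dict:
--     """Analyze password strength from harvested credentials"""
--     # Simplified analysis
--     weak_count = sum(1 for c in credentials if c.get('password', '').__len__() < 8)
--     medium_count = sum(1 for c in credentials if 8 <= c.get('password', '').__len__() <= 12)
--     strong_count = sum(1 for c in credentials if c.get('password', '').__len__() > 12)
--
--     return {
--         'weak': weak_count,
--         'medium': medium_count,
--         'strong': strong_count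
--     }
-- ===== SOURCE B (Python) =====
-- def _analyze_password_strength(credentials):
--     """Analyze password strength from harvested credentials"""
--     weak = medium = strong = 0
--     for c in credentials:
--         n = c.get('password', '').__len__()
--         if n < 8:
--             weak += 1
--         elif n <= 12:
--             medium += 1
--         else:
--             strong += 1
--     return {'weak': weak, 'medium': medium, 'strong': strong}
-- ===== Notes on version B (the rewrite author's own statement) =====
-- stated objective: simpler
-- what changed: Replaces three generator-expression filtering passes over the credential list with one loop keeping three counters and computing each password length once, classifying it by a single if/elif/else chain.
import Mathlib
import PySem

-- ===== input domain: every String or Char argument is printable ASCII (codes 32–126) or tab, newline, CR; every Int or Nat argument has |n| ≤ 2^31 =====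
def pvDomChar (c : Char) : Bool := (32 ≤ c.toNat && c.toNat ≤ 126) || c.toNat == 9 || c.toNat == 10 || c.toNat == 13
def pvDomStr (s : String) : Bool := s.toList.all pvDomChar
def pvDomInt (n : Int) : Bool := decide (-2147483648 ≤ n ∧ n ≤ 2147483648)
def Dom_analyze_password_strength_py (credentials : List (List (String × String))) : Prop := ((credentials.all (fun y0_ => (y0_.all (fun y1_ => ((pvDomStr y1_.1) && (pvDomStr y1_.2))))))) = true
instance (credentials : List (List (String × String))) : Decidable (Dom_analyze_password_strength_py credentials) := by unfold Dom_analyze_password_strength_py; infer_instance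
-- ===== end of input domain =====

-- B replaces A's three filtering passes by one pass with three counters (objective: simpler).

-- ===== PORT A =====
-- c.get('password', '').__len__()
def pyPwLenA (c : List (String × String)) : Int :=
  PySem.Str.len ((PySem.Dict.ofList c).getD "password" "")

def analyze_password_strength_py (credentials : List (List (String × String))) : List (String × Int) :=
  let weak_count := credentials.foldl (fun acc c => if pyPwLenA c < 8 then acc + 1 else acc) (0 : Int)
  let medium_count := credentials.foldl (fun acc c => if 8 ≤ pyPwLenA c ∧ pyPwLenA c ≤ 12 then acc + 1 else acc) (0 : Int)
  let strong_count := credentials.foldl (fun acc c => if pyPwLenA c > 12 then acc + 1 else acc) (0 : Int)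
  [("weak", weak_count), ("medium", medium_count), ("strong", strong_count)]

-- ===== PORT B =====
def pyPwLenB (c : List (String × String)) : Int :=
  PySem.Str.len ((PySem.Dict.ofList c).getD "password" "")

def analyze_password_strength_py_alt (credentials : List (List (String × String))) : List (String × Int) :=
  let acc := credentials.foldl
    (fun (acc : Int × Int × Int) c =>
      let n := pyPwLenB c
      if n < 8 then (acc.1 + 1, acc.2.1, acc.2.2)
      else if n ≤ 12 then (acc.1, acc.2.1 + 1, acc.2.2)
      else (acc.1, acc.2.1, acc.2.2 + 1))
    ((0 : Int), (0 : Int), (0 : Int))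
  [("weak", acc.1), ("medium", acc.2.1), ("strong", acc.2.2)]

-- ===== PRECONDITION & SPEC =====
def Spec_analyze_password_strength_py (credentials : List (List (String × String))) (out : List (String × Int)) : Prop := out = analyze_password_strength_py_alt credentials
instance (credentials : List (List (String × String))) (out : List (String × Int)) : Decidable (Spec_analyze_password_strength_py credentials out) := by unfold Spec_analyze_password_strength_py; infer_instance

-- ===== CLAIM (what is proved, stated in full; the proofs are below) =====
def Claim_equal_analyze_password_strength_py : Prop := ∀ (credentials : List (List (String × String))), Dom_analyze_password_strength_py credentials → Spec_analyze_password_strength_py credentials (analyze_password_strength_py credentials)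

-- ===== LEMMAS AND PROOFS =====
lemma triple_fold (credentials : List (List (String × String))) (w m s : Int) :
    credentials.foldl
      (fun (acc : Int × Int × Int) c =>
        let n := pyPwLenB c
        if n < 8 then (acc.1 + 1, acc.2.1, acc.2.2)
        else if n ≤ 12 then (acc.1, acc.2.1 + 1, acc.2.2)
        else (acc.1, acc.2.1, acc.2.2 + 1)) (w, m, s)
    = (credentials.foldl (fun acc c => if pyPwLenA c < 8 then acc + 1 else acc) w,
       credentials.foldl (fun acc c => if 8 ≤ pyPwLenA c ∧ pyPwLenA c ≤ 12 then acc + 1 else acc) m,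
       credentials.foldl (fun acc c => if pyPwLenA c > 12 then acc + 1 else acc) s) := by
  induction credentials generalizing w m s with
  | nil => rfl
  | cons c cs ih =>
    have hlen : pyPwLenB c = pyPwLenA c := rfl
    simp only [List.foldl_cons, hlen]
    by_cases h1 : pyPwLenA c < 8
    · rw [if_pos h1, ih, if_pos h1,
        if_neg (show ¬(8 ≤ pyPwLenA c ∧ pyPwLenA c ≤ 12) by omega),
        if_neg (show ¬(pyPwLenA c > 12) by omega)]
    · by_cases h2 : pyPwLenA c ≤ 12
      · rw [if_neg h1, if_pos h2, ih, if_neg h1,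
          if_pos (show 8 ≤ pyPwLenA c ∧ pyPwLenA c ≤ 12 by omega),
          if_neg (show ¬(pyPwLenA c > 12) by omega)]
      · rw [if_neg h1, if_neg h2, ih, if_neg h1,
          if_neg (show ¬(8 ≤ pyPwLenA c ∧ pyPwLenA c ≤ 12) by omega),
          if_pos (show pyPwLenA c > 12 by omega)]

-- ===== VERDICT (by name: the statement is the Claim_ definition above) =====
theorem analyze_password_strength_py_spec : Claim_equal_analyze_password_strength_py := by
  intro credentials _
  unfold Spec_analyze_password_strength_py analyze_password_strength_py analyze_password_strength_py_alt
  rw [triple_fold]
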